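-- pv_equiv track=rewrite | github.com/joeforth/phasr | processing.py | cluster_x_values
-- ===== SOURCE A (Python) =====
-- def cluster_x_values(x_values, threshold=30):
--     if not x_values:
--         return []
--     # Sort data by x value
--     x_values.sort(key=lambda tup: tup[1])
--
--     # Grouping
--     groups = []
--     current_group = [x_values[0]]
--
--     for current in x_values[1:]:
--         if abs(current[1] - current_group[-1][1]) <= threshold:
--             current_group.append(current)
--         else:
--             groups.append(current_group)
--             current_group = [current]
--     groups.append(current_group)
--     return groups
-- ===== SOURCE B (Python) =====
-- def cluster_x_values(x_values, threshold=30):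
--     if not x_values:
--         return []
--     # Sort data by x value (in place, like the original)
--     x_values.sort(key=lambda tup: tup[1])
--
--     # Pass 1: scan adjacent gaps once, recording only the run LENGTHS
--     # (the list is sorted, so the adjacent gap is non-negative and needs no abs()).
--     run_lengths = []
--     n = 1
--     for prev, cur in zip(x_values, x_values[1:]):
--         if cur[1] - prev[1] > threshold:
--             run_lengths.append(n)
--             n = 1
--         else:
--             n += 1
--     run_lengths.append(n)
--
--     # Pass 2: cut the sorted list into consecutive slices of those lengths.
--     groups = []
--     rest = x_values
--     for k in run_lengths:
--         groups.append(rest[:k])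
--         rest = rest[k:]
--     return groups
-- ===== Notes on version B (the rewrite author's own statement) =====
-- stated objective: alternative
-- what changed: A builds the groups directly in one accumulate/flush pass; B instead stages the work: a first pass over adjacent pairs of the sorted list records only the integer run lengths (no abs, no group state), and a second pass cuts the sorted list into slices of those lengths.
import Mathlib
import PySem

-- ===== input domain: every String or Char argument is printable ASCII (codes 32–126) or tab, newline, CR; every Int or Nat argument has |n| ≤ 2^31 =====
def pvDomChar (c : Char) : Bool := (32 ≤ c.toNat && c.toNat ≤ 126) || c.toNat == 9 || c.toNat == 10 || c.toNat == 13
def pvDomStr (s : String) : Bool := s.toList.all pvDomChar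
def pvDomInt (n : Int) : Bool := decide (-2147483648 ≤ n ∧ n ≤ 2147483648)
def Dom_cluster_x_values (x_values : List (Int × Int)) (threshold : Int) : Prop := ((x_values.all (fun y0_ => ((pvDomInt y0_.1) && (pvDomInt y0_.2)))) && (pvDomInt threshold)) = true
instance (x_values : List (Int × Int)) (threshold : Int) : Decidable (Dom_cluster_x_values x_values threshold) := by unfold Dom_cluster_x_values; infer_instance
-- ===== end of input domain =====

-- B replaces A's one-pass accumulate/flush grouping by two staged passes: first record only the
-- integer run lengths from adjacent gaps, then cut the sorted list into slices of those lengths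
-- (objective: alternative). Both Pythons sort the argument list in place; the equivalence proved
-- here is about the return value.

-- ===== PORT A =====
-- loop body of A: compare `current` with current_group[-1], append or flush
def astep (threshold : Int) (st : List (List (Int × Int)) × List (Int × Int)) (cur : Int × Int) :
    List (List (Int × Int)) × List (Int × Int) :=
  if |cur.2 - (PySem.List.pyGetD st.2 (-1) ((0 : Int), (0 : Int))).2| ≤ threshold then
    (st.1, st.2 ++ [cur])
  else
    (st.1 ++ [st.2], [cur])

def cluster_x_values (x_values : List (Int × Int)) (threshold : Int) : List (List (Int × Int)) :=
  if x_values = [] then []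
  else
    let s := PySem.List.sorted x_values (fun tup => tup.2) false
    -- for current in x_values[1:] starting from current_group = [x_values[0]], groups = []
    let r := (PySem.List.slice s (some 1) none).foldl (astep threshold)
               ([], [PySem.List.pyGetD s 0 ((0 : Int), (0 : Int))])
    r.1 ++ [r.2]

-- ===== PORT B =====
-- pass-1 body: on a gap > threshold flush the current run length n, else count on
def fstep (threshold : Int) (st : List Int × Int) (pc : (Int × Int) × (Int × Int)) :
    List Int × Int :=
  if pc.2.2 - pc.1.2 > threshold then (st.1 ++ [st.2], 1) else (st.1, st.2 + 1)

-- pass-2 body: groups.append(rest[:k]); rest = rest[k:]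
def cstep (st : List (List (Int × Int)) × List (Int × Int)) (k : Int) :
    List (List (Int × Int)) × List (Int × Int) :=
  (st.1 ++ [PySem.List.slice st.2 none (some k)], PySem.List.slice st.2 (some k) none)

def cluster_x_values_alt (x_values : List (Int × Int)) (threshold : Int) : List (List (Int × Int)) :=
  if x_values = [] then []
  else
    let s := PySem.List.sorted x_values (fun tup => tup.2) false
    -- for prev, cur in zip(x_values, x_values[1:]) starting from run_lengths = [], n = 1
    let p := (s.zip (PySem.List.slice s (some 1) none)).foldl (fstep threshold) ([], 1)
    let run_lengths := p.1 ++ [p.2]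
    -- for k in run_lengths starting from groups = [], rest = x_values
    (run_lengths.foldl cstep ([], s)).1

-- ===== PRECONDITION & SPEC =====
def Spec_cluster_x_values (x_values : List (Int × Int)) (threshold : Int) (out : List (List (Int × Int))) : Prop := out = cluster_x_values_alt x_values threshold
instance (x_values : List (Int × Int)) (threshold : Int) (out : List (List (Int × Int))) : Decidable (Spec_cluster_x_values x_values threshold out) := by unfold Spec_cluster_x_values; infer_instance

-- ===== CLAIM (what is proved, stated in full; the proofs are below) =====
def Claim_equal_cluster_x_values : Prop := ∀ (x_values : List (Int × Int)) (threshold : Int), Dom_cluster_x_values x_values threshold → Spec_cluster_x_values x_values threshold (cluster_x_values x_values threshold)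

-- ===== LEMMAS AND PROOFS =====

-- reference one-step grouping used as a bridge between the two ports:
-- prepend cur into the first group when within threshold of its head, else open a new group
def bstep (threshold : Int) (cur : Int × Int) (groups : List (List (Int × Int))) :
    List (List (Int × Int)) :=
  match groups with
  | (h :: g) :: gs =>
      if |h.2 - cur.2| ≤ threshold then (cur :: h :: g) :: gs else [cur] :: (h :: g) :: gs
  | _ => [cur] :: groups

-- glue c r : attach the prefix c to the first group of r
def glue (c : List (Int × Int)) (r : List (List (Int × Int))) : List (List (Int × Int)) :=
  match r with
  | g :: gs => (c ++ g) :: gs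
  | [] => [c]

-- the right fold of bstep on a nonempty list yields a first group headed by the first element
theorem bfold_head (threshold : Int) (p : Int × Int) (t : List (Int × Int)) :
    ∃ g gs, List.foldr (bstep threshold) [] (p :: t) = (p :: g) :: gs := by
  induction t generalizing p with
  | nil => exact ⟨[], [], rfl⟩
  | cons b t ih =>
    obtain ⟨g, gs, h⟩ := ih b
    simp only [List.foldr_cons] at h ⊢
    rw [h, bstep]
    split_ifs
    · exact ⟨b :: g, gs, rfl⟩
    · exact ⟨[], (b :: g) :: gs, rfl⟩

-- A-side loop invariant: A's fold with current group c ++ [p] equals the prefix c glued onto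
-- the bstep right fold started at p
theorem loop_eq (threshold : Int) (t : List (Int × Int)) :
    ∀ (c : List (Int × Int)) (p : Int × Int) (groups : List (List (Int × Int))),
      (t.foldl (astep threshold) (groups, c ++ [p])).1 ++ [(t.foldl (astep threshold) (groups, c ++ [p])).2]
        = groups ++ glue c (List.foldr (bstep threshold) [] (p :: t)) := by
  induction t with
  | nil => intro c p groups; simp [glue, bstep]
  | cons b t ih =>
    intro c p groups
    obtain ⟨g, gs, hb⟩ := bfold_head threshold b t
    have ha : astep threshold (groups, c ++ [p]) b =
        if |b.2 - p.2| ≤ threshold then (groups, (c ++ [p]) ++ [b]) else (groups ++ [c ++ [p]], [b]) := by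
      simp [astep, PySem.List.pyGetD_neg_one_append_singleton]
    have hr : List.foldr (bstep threshold) [] (p :: b :: t) =
        if |b.2 - p.2| ≤ threshold then (p :: b :: g) :: gs else [p] :: (b :: g) :: gs := by
      rw [List.foldr_cons, hb]; simp [bstep]
    rw [List.foldl_cons, ha, hr]
    by_cases hc : |b.2 - p.2| ≤ threshold
    · rw [if_pos hc, if_pos hc]
      have := ih (c ++ [p]) b groups
      rw [hb] at this
      simpa [glue] using this
    · rw [if_neg hc, if_neg hc]
      have := ih [] b (groups ++ [c ++ [p]])
      rw [hb] at this
      simpa [glue] using this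

-- B-side: add k to the first entry of a run-length list
def addI (k : Int) : List Int → List Int
  | [] => []
  | m :: r => (m + k) :: r

theorem addI_addI (j k : Int) (r : List Int) : addI j (addI k r) = addI (j + k) r := by
  cases r with
  | nil => rfl
  | cons m r => simp [addI]; ring

-- run lengths of the adjacent-gap grouping, recursively
def runLensI (threshold : Int) : List (Int × Int) → List Int
  | [] => []
  | [_] => [1]
  | a :: b :: t =>
      if b.2 - a.2 > threshold then 1 :: runLensI threshold (b :: t)
      else addI 1 (runLensI threshold (b :: t))

theorem runLensI_cons (threshold : Int) (t : List (Int × Int)) :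
    ∀ a : Int × Int, ∃ m r, runLensI threshold (a :: t) = m :: r ∧ 1 ≤ m := by
  induction t with
  | nil => exact fun a => ⟨1, [], rfl, le_refl 1⟩
  | cons b t ih =>
    intro a
    obtain ⟨m, r, hR, hm⟩ := ih b
    by_cases h : b.2 - a.2 > threshold
    · exact ⟨1, runLensI threshold (b :: t), by simp [runLensI, h], le_refl 1⟩
    · refine ⟨m + 1, r, ?_, by omega⟩
      simp only [runLensI, if_neg h, hR, addI]

-- pass 1 of B computes runLensI
theorem fold_runs (threshold : Int) (t : List (Int × Int)) :
    ∀ (a : Int × Int) (L : List Int) (n : Int),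
      (((a :: t).zip t).foldl (fstep threshold) (L, n)).1
          ++ [(((a :: t).zip t).foldl (fstep threshold) (L, n)).2]
        = L ++ addI (n - 1) (runLensI threshold (a :: t)) := by
  induction t with
  | nil =>
    intro a L n
    simp [runLensI, addI]
  | cons b t ih =>
    intro a L n
    rw [List.zip_cons_cons, List.foldl_cons]
    by_cases h : b.2 - a.2 > threshold
    · rw [show fstep threshold (L, n) (a, b) = (L ++ [n], 1) by simp [fstep, h]]
      rw [ih b (L ++ [n]) 1]
      obtain ⟨m, r, hR, _⟩ := runLensI_cons threshold t b
      simp [runLensI, h, hR, addI]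
    · rw [show fstep threshold (L, n) (a, b) = (L, n + 1) by simp [fstep, h]]
      rw [ih b L (n + 1)]
      rw [show runLensI threshold (a :: b :: t) = addI 1 (runLensI threshold (b :: t)) by
        simp [runLensI, h]]
      rw [addI_addI]
      congr 2
      omega

-- pass 2 of B: the groups accumulator factors out
theorem cut_acc (ks : List Int) :
    ∀ (G : List (List (Int × Int))) (rest : List (Int × Int)),
      (ks.foldl cstep (G, rest)).1 = G ++ (ks.foldl cstep ([], rest)).1 := by
  induction ks with
  | nil => intro G rest; simp
  | cons k ks ih =>
    intro G rest
    rw [List.foldl_cons, List.foldl_cons]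
    show (ks.foldl cstep (G ++ [_], _)).1 = G ++ (ks.foldl cstep ([] ++ [_], _)).1
    rw [ih (G ++ [PySem.List.slice rest none (some k)]), List.nil_append,
        ih [PySem.List.slice rest none (some k)]]
    simp

-- cutting the sorted list by runLensI equals the bstep right fold, on a chain-sorted list
theorem cut_eq_bfold (threshold : Int) (t : List (Int × Int)) :
    ∀ a : Int × Int, List.Pairwise (fun x y : Int × Int => x.2 ≤ y.2) (a :: t) →
      ((runLensI threshold (a :: t)).foldl cstep ([], a :: t)).1
        = List.foldr (bstep threshold) [] (a :: t) := by
  induction t with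
  | nil =>
    intro a _
    show ([(1 : Int)].foldl cstep ([], [a])).1 = _
    simp [cstep, bstep, PySem.List.slice_to ([a]) (b := 1) (by omega),
      PySem.List.slice_from ([a]) (a := 1) (by omega)]
  | cons b t ih =>
    intro a hch
    have hab : a.2 ≤ b.2 := (List.pairwise_cons.mp hch).1 b (by simp)
    have hch' : List.Pairwise (fun x y : Int × Int => x.2 ≤ y.2) (b :: t) :=
      (List.pairwise_cons.mp hch).2
    obtain ⟨m, r, hR, hm⟩ := runLensI_cons threshold t b
    obtain ⟨g, gs, hb⟩ := bfold_head threshold b t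
    -- unpack the inductive hypothesis one step
    have hih := ih b hch'
    rw [hR, List.foldl_cons] at hih
    have hcs : cstep ([], b :: t) m =
        ([(b :: t).take m.toNat], (b :: t).drop m.toNat) := by
      simp [cstep, PySem.List.slice_to (b :: t) (b := m) (by omega),
        PySem.List.slice_from (b :: t) (a := m) (by omega)]
    rw [hcs, cut_acc, hb] at hih
    have htake : (b :: t).take m.toNat = b :: g ∧
        (r.foldl cstep ([], (b :: t).drop m.toNat)).1 = gs := by
      have h2 : (b :: t).take m.toNat :: (r.foldl cstep ([], (b :: t).drop m.toNat)).1
          = (b :: g) :: gs := by simpa using hih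
      exact ⟨(List.cons_eq_cons.mp h2).1, (List.cons_eq_cons.mp h2).2⟩
    by_cases h : b.2 - a.2 > threshold
    · -- new group at a
      rw [show runLensI threshold (a :: b :: t) = 1 :: m :: r by simp [runLensI, h, hR]]
      rw [List.foldl_cons]
      have hc1 : cstep ([], a :: b :: t) 1 = ([[a]], b :: t) := by
        simp [cstep, PySem.List.slice_to (a :: b :: t) (b := 1) (by omega),
          PySem.List.slice_from (a :: b :: t) (a := 1) (by omega)]
      rw [hc1, cut_acc, List.foldl_cons, hcs, cut_acc, htake.2]
      rw [List.foldr_cons, hb, bstep]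
      have : ¬ |b.2 - a.2| ≤ threshold := by rw [abs_of_nonneg (by omega)]; omega
      rw [if_neg this]
      simp [htake.1]
    · -- a joins the first group
      rw [show runLensI threshold (a :: b :: t) = (m + 1) :: r by
        simp [runLensI, h, hR, addI]]
      rw [List.foldl_cons]
      have hmn : (m + 1).toNat = m.toNat + 1 := by omega
      have hc2 : cstep ([], a :: b :: t) (m + 1) =
          ([a :: (b :: t).take m.toNat], (b :: t).drop m.toNat) := by
        simp [cstep, PySem.List.slice_to (a :: b :: t) (b := m + 1) (by omega),
          PySem.List.slice_from (a :: b :: t) (a := m + 1) (by omega), hmn]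
      rw [hc2, cut_acc, htake.2]
      rw [List.foldr_cons, hb, bstep]
      have : |b.2 - a.2| ≤ threshold := by rw [abs_of_nonneg (by omega)]; omega
      rw [if_pos this]
      simp [htake.1]

-- ===== VERDICT (by name: the statement is the Claim_ definition above) =====
theorem cluster_x_values_spec : Claim_equal_cluster_x_values := by
  intro x_values threshold _
  unfold Spec_cluster_x_values
  by_cases h : x_values = []
  · simp [cluster_x_values, cluster_x_values_alt, h]
  · simp only [cluster_x_values, cluster_x_values_alt, if_neg h]
    set s := PySem.List.sorted x_values (fun tup => tup.2) false with hs
    have hsne : s ≠ [] := by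
      have hp := PySem.List.sorted_perm (xs := x_values) (key := fun tup => tup.2) (rev := false)
      rw [← hs] at hp
      intro hnil
      exact h ((hnil ▸ hp).symm.eq_nil)
    obtain ⟨a, t, hat⟩ := List.exists_cons_of_ne_nil hsne
    have hslice : PySem.List.slice s (some 1) none = t := by
      rw [hat, PySem.List.slice_from_one]; rfl
    have hget : PySem.List.pyGetD s 0 ((0 : Int), (0 : Int)) = a := by
      rw [hat, PySem.List.pyGetD_zero_cons]
    -- A's side equals the bstep right fold
    have hA := loop_eq threshold t [] a []
    simp only [List.nil_append] at hA
    -- B's run lengths equal runLensI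
    have hruns := fold_runs threshold t a [] 1
    obtain ⟨m, r, hR, _⟩ := runLensI_cons threshold t a
    rw [hR] at hruns
    simp only [List.nil_append, addI] at hruns
    rw [show (1 : Int) - 1 = 0 by omega, add_zero] at hruns
    -- B's side equals the bstep right fold, using sortedness
    have hchain : List.Pairwise (fun x y : Int × Int => x.2 ≤ y.2) (a :: t) := by
      have hpw := PySem.List.sorted_pairwise (xs := x_values) (key := fun tup => tup.2)
      rw [← hs, hat] at hpw
      exact hpw
    have hB := cut_eq_bfold threshold t a hchain
    rw [hR] at hB
    rw [hslice, hget, hat, hruns, hB, hA]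
    obtain ⟨g, gs, hbf⟩ := bfold_head threshold a t
    rw [hbf]
    simp [glue]
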